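-- pv_equiv track=rewrite | github.com/MrHamdulay/csc3-capstone | examples/data/Assignment_7/sldcar001/push.py | push_down
-- ===== SOURCE A (Python) =====
-- def push_down(grid):
--     for row in range(4):
--         add=[]
--         for col in range(4):
--             a=grid[col][row]
--             if a!=0:
--                 add.append(a)
--         add.reverse()
--         g=0
--         if len(add)!=0:
--             while g < len(add):
--                 if g+1!=len(add):
--                     if add[g]==add[g+1]:
--                         add[g]=add[g]*2
--                         del add[g+1]
--                 g+=1
--         while len(add)!=4:
--             add.append(0)
--         add.reverse()
--         for ncol in range(4):
--             grid[ncol][row]=add[ncol]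
--     return(grid)
-- ===== SOURCE B (Python) =====
-- def push_down(grid):
--     for row in range(4):
--         vals = [grid[col][row] for col in range(4) if grid[col][row]]
--         out = []
--         merged = False
--         for v in reversed(vals):
--             if out and not merged and out[-1] == v:
--                 out[-1] = v * 2
--                 merged = True
--             else:
--                 out.append(v)
--                 merged = False
--         column = [0] * (4 - len(out)) + out[::-1]
--         for ncol in range(4):
--             grid[ncol][row] = column[ncol]
--     return grid
-- ===== Notes on version B (the rewrite author's own statement) =====
-- stated objective: idiomatic
-- what changed: B replaces A's reverse/index-walk/del-based while loop with a single forward fold over the filtered column using a last-value-plus-merged-flag accumulator, and builds the padded column by list arithmetic instead of append-and-reverse.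
import Mathlib
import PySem

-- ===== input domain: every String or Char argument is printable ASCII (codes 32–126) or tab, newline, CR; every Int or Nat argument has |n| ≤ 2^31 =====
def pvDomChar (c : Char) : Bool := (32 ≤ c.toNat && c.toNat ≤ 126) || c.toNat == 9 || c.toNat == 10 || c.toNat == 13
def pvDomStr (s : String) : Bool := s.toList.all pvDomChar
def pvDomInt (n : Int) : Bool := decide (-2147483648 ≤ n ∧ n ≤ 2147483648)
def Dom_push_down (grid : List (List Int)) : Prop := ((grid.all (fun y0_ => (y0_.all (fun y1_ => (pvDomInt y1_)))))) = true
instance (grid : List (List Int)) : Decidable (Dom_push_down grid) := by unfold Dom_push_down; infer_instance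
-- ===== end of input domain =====

-- B rewrites the per-column merge as one forward pass with a merged-flag accumulator (idiomatic).
-- Both A and B mutate `grid` in place in Python in the same way and return it; the ports model the returned value.

-- ===== PORT A =====
-- grid[col][row] (both indices 0..3, in range under Pre_)
def pvReadA (g : List (List Int)) (c r : Int) : Int :=
  PySem.List.pyGetD (PySem.List.pyGetD g c []) r 0

-- the while loop over `add` with `del add[g+1]`: at index g, if the next element is
-- equal, double and delete it, then advance past the doubled element; else advance.
def pvMergeA : List Int → List Int
  | a :: b :: t => if a = b then a * 2 :: pvMergeA t else a :: pvMergeA (b :: t)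
  | l => l

-- one iteration of A's `for row in range(4)` body (len(add) ≤ 4 always, so the
-- padding `while len(add)!=4: add.append(0)` appends exactly 4 - len zeros)
def pvStepA (g : List (List Int)) (row : Int) : List (List Int) :=
  let add0 := (PySem.List.pyRange 0 4 1).foldl
      (fun acc c => if pvReadA g c row ≠ 0 then acc ++ [pvReadA g c row] else acc) []
  let add1 := add0.reverse
  let add2 := pvMergeA add1
  let add3 := add2 ++ List.replicate (4 - add2.length) 0
  let add := add3.reverse
  (PySem.List.pyRange 0 4 1).foldl
    (fun g' c => PySem.List.pySetD g' c
        (PySem.List.pySetD (PySem.List.pyGetD g' c []) row (PySem.List.pyGetD add c 0))) g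

def push_down (grid : List (List Int)) : List (List Int) :=
  (PySem.List.pyRange 0 4 1).foldl pvStepA grid

-- ===== PORT B =====
def pvReadB (g : List (List Int)) (c r : Int) : Int :=
  PySem.List.pyGetD (PySem.List.pyGetD g c []) r 0

-- B's forward pass over reversed(vals); `out` is kept head-first (head = Python's out[-1])
def pvMergeLoopB : List Int → List Int → Bool → List Int
  | [], out, _ => out
  | v :: t, out, merged =>
    match out, merged with
    | last :: rest, false =>
        if last = v then pvMergeLoopB t (v * 2 :: rest) true
        else pvMergeLoopB t (v :: last :: rest) false
    | _, _ => pvMergeLoopB t (v :: out) false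

-- one iteration of B's `for row in range(4)` body
def pvStepB (g : List (List Int)) (row : Int) : List (List Int) :=
  let vals := ((PySem.List.pyRange 0 4 1).map (fun c => pvReadB g c row)).filter
      (fun a => decide (a ≠ 0))
  let out := pvMergeLoopB vals.reverse [] false
  let column := List.replicate (4 - out.length) 0 ++ out
  (PySem.List.pyRange 0 4 1).foldl
    (fun g' c => PySem.List.pySetD g' c
        (PySem.List.pySetD (PySem.List.pyGetD g' c []) row (PySem.List.pyGetD column c 0))) g

def push_down_alt (grid : List (List Int)) : List (List Int) :=
  (PySem.List.pyRange 0 4 1).foldl pvStepB grid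

-- ===== PRECONDITION & SPEC =====
-- Pre_ excludes exactly the inputs on which Python A raises IndexError:
-- fewer than 4 rows, or one of the first 4 rows shorter than 4.
def Pre_push_down (grid : List (List Int)) : Prop :=
  4 ≤ grid.length ∧ ∀ r ∈ grid.take 4, 4 ≤ r.length
instance (grid : List (List Int)) : Decidable (Pre_push_down grid) := by
  unfold Pre_push_down; infer_instance

def pvWitness_push_down : List (List Int) :=
  [[2, 0, 0, 2], [2, 2, 4, 0], [0, 2, 0, 2], [4, 0, 4, 2]]

def Spec_push_down (grid : List (List Int)) (out : List (List Int)) : Prop := out = push_down_alt grid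
instance (grid : List (List Int)) (out : List (List Int)) : Decidable (Spec_push_down grid out) := by unfold Spec_push_down; infer_instance

-- ===== CLAIM (what is proved, stated in full; the proofs are below) =====
def Claim_equal_push_down : Prop := ∀ (grid : List (List Int)), Dom_push_down grid → Pre_push_down grid → Spec_push_down grid (push_down grid)

-- ===== LEMMAS AND PROOFS =====

-- B's flagged forward pass computes A's adjacent-merge, accumulated in reverse.
theorem pvMergeLoopB_spec (l : List Int) :
    (∀ acc, pvMergeLoopB l acc true = (pvMergeA l).reverse ++ acc) ∧
    (∀ acc x, pvMergeLoopB l (x :: acc) false = (pvMergeA (x :: l)).reverse ++ acc) := by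
  induction l with
  | nil => constructor <;> intros <;> simp [pvMergeLoopB, pvMergeA]
  | cons v t ih =>
    obtain ⟨ih1, ih2⟩ := ih
    constructor
    · intro acc
      simpa [pvMergeLoopB] using ih2 acc v
    · intro acc x
      by_cases h : x = v
      · subst h
        simp [pvMergeLoopB, pvMergeA, ih1]
      · simp only [pvMergeLoopB, pvMergeA, if_neg h]
        rw [ih2 (x :: acc) v]
        simp

theorem pvMergeLoopB_nil (l : List Int) :
    pvMergeLoopB l [] false = (pvMergeA l).reverse := by
  cases l with
  | nil => simp [pvMergeLoopB, pvMergeA]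
  | cons v t =>
    simpa [pvMergeLoopB] using (pvMergeLoopB_spec t).2 [] v

theorem pvStep_eq (g : List (List Int)) (row : Int) : pvStepA g row = pvStepB g row := by
  simp only [pvStepA, pvStepB]
  have hread : pvReadB = pvReadA := rfl
  have hcollect :
      (PySem.List.pyRange 0 4 1).foldl
        (fun acc c => if pvReadA g c row ≠ 0 then acc ++ [pvReadA g c row] else acc) [] =
      ((PySem.List.pyRange 0 4 1).map (fun c => pvReadB g c row)).filter
        (fun a => decide (a ≠ 0)) := by
    rw [PySem.List.foldl_append_ite (p := fun c => pvReadA g c row ≠ 0)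
        (f := fun c => pvReadA g c row), List.filter_map]
    simp only [hread, Function.comp_def, List.nil_append]
  rw [← hcollect]
  set vals := (PySem.List.pyRange 0 4 1).foldl
      (fun acc c => if pvReadA g c row ≠ 0 then acc ++ [pvReadA g c row] else acc) [] with hv
  have hcol :
      (pvMergeA vals.reverse ++ List.replicate (4 - (pvMergeA vals.reverse).length) 0).reverse =
      List.replicate (4 - (pvMergeLoopB vals.reverse [] false).length) 0 ++
        pvMergeLoopB vals.reverse [] false := by
    rw [pvMergeLoopB_nil]
    simp [List.reverse_append]
  rw [hcol]

-- ===== VERDICT (by name: the statement is the Claim_ definition above) =====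
theorem push_down_spec : Claim_equal_push_down := by
  intro grid _ _
  unfold Spec_push_down push_down push_down_alt
  rw [show pvStepA = pvStepB from funext₂ pvStep_eq]
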